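-- pv_equiv track=rewrite | github.com/zurailuridze123/goa-homeworks | day 47/homework/homework2.py | sum_of_n
-- ===== SOURCE A (Python) =====
-- def sum_of_n(n):
--     result = []
--     for i in range(abs(n) + 1):
--         if n >= 0:
--             result.append(sum(range(i+1)))
--         else:
--             result.append(-sum(range(i+1)))
--     return result
-- ===== SOURCE B (Python) =====
-- def sum_of_n(n):
--     sign = 1 if n >= 0 else -1
--     result = []
--     acc = 0
--     for i in range(abs(n) + 1):
--         acc += i
--         result.append(sign * acc)
--     return result
-- ===== Notes on version B (the rewrite author's own statement) =====
-- stated objective: faster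
-- what changed: replaces the inner sum(range(i+1)) recomputed for every i by a single running accumulator (and a precomputed sign), turning the nested loop into one pass
import Mathlib
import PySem

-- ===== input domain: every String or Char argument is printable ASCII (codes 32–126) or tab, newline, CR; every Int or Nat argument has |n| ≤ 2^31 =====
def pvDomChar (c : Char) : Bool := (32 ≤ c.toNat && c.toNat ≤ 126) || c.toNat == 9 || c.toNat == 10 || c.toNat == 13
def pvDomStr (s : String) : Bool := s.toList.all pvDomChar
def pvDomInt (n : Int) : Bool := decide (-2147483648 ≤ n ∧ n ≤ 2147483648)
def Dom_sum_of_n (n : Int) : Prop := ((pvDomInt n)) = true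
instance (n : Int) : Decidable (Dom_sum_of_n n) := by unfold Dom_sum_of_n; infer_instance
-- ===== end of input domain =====

-- B replaces A's inner sum(range(i+1)) (recomputed for every i) by one running accumulator: one pass instead of a nested loop.

-- ===== PORT A =====
-- sum(range(i+1)) of Python, as the fold Python's sum performs
def pvInnerSum (i : Int) : Int := (PySem.List.pyRange 0 (i + 1) 1).foldl (· + ·) 0

def sum_of_n (n : Int) : List Int :=
  (PySem.List.pyRange 0 ((n.natAbs : Int) + 1) 1).foldl
    (fun result i => if n ≥ 0 then result ++ [pvInnerSum i] else result ++ [-(pvInnerSum i)]) []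

-- ===== PORT B =====
def sum_of_n_alt (n : Int) : List Int :=
  let sign : Int := if n ≥ 0 then 1 else -1
  ((PySem.List.pyRange 0 ((n.natAbs : Int) + 1) 1).foldl
    (fun (p : Int × List Int) i => (p.1 + i, p.2 ++ [sign * (p.1 + i)])) (0, [])).2

-- ===== PRECONDITION & SPEC =====
def Spec_sum_of_n (n : Int) (out : List Int) : Prop := out = sum_of_n_alt n
instance (n : Int) (out : List Int) : Decidable (Spec_sum_of_n n out) := by unfold Spec_sum_of_n; infer_instance

-- ===== CLAIM (what is proved, stated in full; the proofs are below) =====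
def Claim_equal_sum_of_n : Prop := ∀ (n : Int), Dom_sum_of_n n → Spec_sum_of_n n (sum_of_n n)

-- ===== LEMMAS AND PROOFS =====

-- T m = 0 + 1 + … + (m-1), the value of B's accumulator after m iterations
def pvT : Nat → Int
  | 0 => 0
  | m + 1 => pvT m + m

theorem pvT_range (m : Nat) : (PySem.List.pyRange 0 (m : Int) 1).foldl (· + ·) 0 = pvT m := by
  induction m with
  | zero => simp [PySem.List.pyRange_one_eq_nil, pvT]
  | succ m ih =>
    rw [show ((m + 1 : Nat) : Int) = (m : Int) + 1 by push_cast; ring,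
        PySem.List.pyRange_one_succ_right (by positivity), List.foldl_append]
    simp [pvT, ih]

theorem pvInnerSum_eq (m : Nat) : pvInnerSum (m : Int) = pvT (m + 1) := by
  unfold pvInnerSum
  rw [show ((m : Int) + 1) = ((m + 1 : Nat) : Int) by push_cast; ring, pvT_range]

theorem pv_loop (n : Int) (m : Nat) :
    (PySem.List.pyRange 0 (m : Int) 1).foldl
      (fun (p : Int × List Int) i =>
        (p.1 + i, p.2 ++ [(if n ≥ 0 then (1 : Int) else -1) * (p.1 + i)])) (0, []) =
    (pvT m,
      (PySem.List.pyRange 0 (m : Int) 1).foldl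
        (fun result i => if n ≥ 0 then result ++ [pvInnerSum i] else result ++ [-(pvInnerSum i)]) []) := by
  induction m with
  | zero => simp [PySem.List.pyRange_one_eq_nil, pvT]
  | succ m ih =>
    rw [show ((m + 1 : Nat) : Int) = (m : Int) + 1 by push_cast; ring,
        PySem.List.pyRange_one_succ_right (by positivity)]
    simp only [List.foldl_append, List.foldl_cons, List.foldl_nil, ih, pvInnerSum_eq]
    by_cases h : n ≥ 0 <;> simp [h, pvT]

-- ===== VERDICT (by name: the statement is the Claim_ definition above) =====
theorem sum_of_n_spec : Claim_equal_sum_of_n := by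
  intro n _
  unfold Spec_sum_of_n sum_of_n sum_of_n_alt
  rw [show ((n.natAbs : Int) + 1) = ((n.natAbs + 1 : Nat) : Int) by push_cast; ring]
  exact (congrArg Prod.snd (pv_loop n (n.natAbs + 1))).symm
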